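-- pv_equiv track=rewrite | github.com/kamyu104/LeetCode-Solutions | Python/maximum-calories-burnt-from-jumps.py | maxCaloriesBurnt
-- ===== SOURCE A (Python) =====
-- def maxCaloriesBurnt(heights):
--     """
--     :type heights: List[int]
--     :rtype: int
--     """
--     heights.sort()
--     d = 0
--     left, right = 0, len(heights)-1
--     result = (0-heights[right])**2
--     while left != right:
--         result += (heights[right]-heights[left])**2
--         left += d
--         d ^= 1
--         right -= d
--     return result
-- ===== SOURCE B (Python) =====
-- def maxCaloriesBurnt(heights):
--     heights.sort()
--     s = [0]
--     i, j = 0, len(heights) - 1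
--     high = True
--     while i <= j:
--         if high:
--             s.append(heights[j])
--             j -= 1
--         else:
--             s.append(heights[i])
--             i += 1
--         high = not high
--     return sum((b - a) ** 2 for a, b in zip(s, s[1:]))
-- ===== Notes on version B (the rewrite author's own statement) =====
-- stated objective: simpler
-- what changed: Instead of the index/toggle arithmetic loop (left += d; d ^= 1; right -= d) that accumulates squared differences in place, B builds the explicit zigzag visiting order [0, max, min, 2nd max, 2nd min, ...] with two pointers and sums the squared differences of adjacent elements with zip.
import Mathlib
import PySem

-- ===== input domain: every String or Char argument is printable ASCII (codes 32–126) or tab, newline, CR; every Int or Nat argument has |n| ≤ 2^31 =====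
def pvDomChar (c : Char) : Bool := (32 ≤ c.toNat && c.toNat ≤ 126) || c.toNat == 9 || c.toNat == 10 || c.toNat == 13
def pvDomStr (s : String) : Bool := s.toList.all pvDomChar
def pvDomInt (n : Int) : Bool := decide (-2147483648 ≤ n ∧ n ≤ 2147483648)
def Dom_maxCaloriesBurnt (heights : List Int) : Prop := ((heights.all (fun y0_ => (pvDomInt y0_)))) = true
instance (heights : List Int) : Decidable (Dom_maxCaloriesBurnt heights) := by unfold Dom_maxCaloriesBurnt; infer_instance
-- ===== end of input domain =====

-- B replaces A's index/toggle arithmetic loop by an explicit two-pointer zigzag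
-- sequence [0, max, min, 2nd max, ...] summed with zip (objective: simpler).
-- A sorts its argument in place; the equivalence proved here is about the return value.

-- ===== PORT A =====
-- while loop with state (d, left, right, result); each iteration moves exactly one
-- pointer by 1, so `hs.length` steps of fuel always suffice before left = right.
-- `(pyGet? …).getD 0` is only evaluated with in-range indices on Pre_ (nonempty) inputs.
def maxCaloriesBurnt_loop (hs : List Int) (fuel : Nat) (d left right result : Int) : Int :=
  match fuel with
  | 0 => result
  | f + 1 =>
    if left = right then result
    else
      let result := result + ((PySem.List.pyGet? hs right).getD 0 - (PySem.List.pyGet? hs left).getD 0) ^ 2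
      let left := left + d
      let d := if d = 0 then 1 else 0   -- d ^= 1 with d ∈ {0,1}
      let right := right - d
      maxCaloriesBurnt_loop hs f d left right result

def maxCaloriesBurnt (heights : List Int) : Int :=
  let hs := PySem.List.sorted heights (fun x => x) false
  let right : Int := (hs.length : Int) - 1
  let result := (0 - (PySem.List.pyGet? hs right).getD 0) ^ 2
  maxCaloriesBurnt_loop hs hs.length 0 0 right result

-- ===== PORT B =====
-- the appended elements of s after the leading 0: alternately the high and low end
def maxCaloriesBurnt_zig (hs : List Int) (i j : Int) (high : Bool) : List Int :=
  if h : i ≤ j then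
    if high then (PySem.List.pyGet? hs j).getD 0 :: maxCaloriesBurnt_zig hs i (j - 1) false
    else (PySem.List.pyGet? hs i).getD 0 :: maxCaloriesBurnt_zig hs (i + 1) j true
  else []
termination_by (j - i + 1).toNat
decreasing_by all_goals omega

def maxCaloriesBurnt_alt (heights : List Int) : Int :=
  let hs := PySem.List.sorted heights (fun x => x) false
  let s := 0 :: maxCaloriesBurnt_zig hs 0 ((hs.length : Int) - 1) true
  (s.zip s.tail).foldl (fun acc ab => acc + (ab.2 - ab.1) ^ 2) 0

-- ===== PRECONDITION & SPEC =====
-- Pre_ excludes exactly the empty list, on which A raises IndexError.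
def Pre_maxCaloriesBurnt (heights : List Int) : Prop := heights ≠ []
instance (heights : List Int) : Decidable (Pre_maxCaloriesBurnt heights) := by
  unfold Pre_maxCaloriesBurnt; infer_instance
def pvWitness_maxCaloriesBurnt : List Int := [3, 1, 2]

def Spec_maxCaloriesBurnt (heights : List Int) (out : Int) : Prop := out = maxCaloriesBurnt_alt heights
instance (heights : List Int) (out : Int) : Decidable (Spec_maxCaloriesBurnt heights out) := by
  unfold Spec_maxCaloriesBurnt; infer_instance

-- ===== CLAIM (what is proved, stated in full; the proofs are below) =====
def Claim_equal_maxCaloriesBurnt : Prop := ∀ (heights : List Int), Dom_maxCaloriesBurnt heights → Pre_maxCaloriesBurnt heights → Spec_maxCaloriesBurnt heights (maxCaloriesBurnt heights)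

-- ===== LEMMAS AND PROOFS =====

-- sum of squared differences along a chain, given the previous element
def pvTailSum (p : Int) : List Int → Int
  | [] => 0
  | x :: xs => (x - p) ^ 2 + pvTailSum x xs

lemma pvFoldl_zip_tailSum (p acc : Int) (xs : List Int) :
    ((p :: xs).zip xs).foldl (fun acc ab => acc + (ab.2 - ab.1) ^ 2) acc
      = acc + pvTailSum p xs := by
  induction xs generalizing p acc with
  | nil => simp [pvTailSum]
  | cons x xs ih =>
    have hz : ((p :: x :: xs).zip (x :: xs)) = (p, x) :: ((x :: xs).zip xs) := by
      simp [List.zip]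
    rw [hz, List.foldl_cons, ih]
    simp [pvTailSum]
    ring

lemma pvZig_nil (hs : List Int) (i j : Int) (high : Bool) (h : j < i) :
    maxCaloriesBurnt_zig hs i j high = [] := by
  rw [maxCaloriesBurnt_zig]; simp [not_le.mpr h]

lemma pvZig_high (hs : List Int) (i j : Int) (h : i ≤ j) :
    maxCaloriesBurnt_zig hs i j true
      = (PySem.List.pyGet? hs j).getD 0 :: maxCaloriesBurnt_zig hs i (j - 1) false := by
  rw [maxCaloriesBurnt_zig]; simp [h]

lemma pvZig_low (hs : List Int) (i j : Int) (h : i ≤ j) :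
    maxCaloriesBurnt_zig hs i j false
      = (PySem.List.pyGet? hs i).getD 0 :: maxCaloriesBurnt_zig hs (i + 1) j true := by
  rw [maxCaloriesBurnt_zig]; simp [h]

-- the loop of A computes the chain sum of the remaining zigzag elements
lemma pvLoop_eq_tailSum (hs : List Int) :
    ∀ (fuel : Nat) (l r res : Int) (d : Int), l ≤ r → (r - l).toNat ≤ fuel →
      (d = 0 ∨ d = 1) →
      maxCaloriesBurnt_loop hs fuel d l r res
        = res + pvTailSum
            ((PySem.List.pyGet? hs (if d = 0 then r else l)).getD 0)
            (if d = 0 then maxCaloriesBurnt_zig hs l (r - 1) false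
             else maxCaloriesBurnt_zig hs (l + 1) r true) := by
  intro fuel
  induction fuel with
  | zero =>
    intro l r res d hlr hfuel hd
    have : l = r := by omega
    subst this
    rcases hd with rfl | rfl <;>
      simp [maxCaloriesBurnt_loop,
        pvZig_nil hs _ _ _ (by omega : (l:Int) - 1 < l),
        pvZig_nil hs _ _ _ (by omega : (l:Int) < l + 1), pvTailSum]
  | succ f ih =>
    intro l r res d hlr hfuel hd
    rw [maxCaloriesBurnt_loop]
    by_cases heq : l = r
    · subst heq
      rcases hd with rfl | rfl <;>
        simp [pvZig_nil hs _ _ _ (by omega : (l:Int) - 1 < l),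
          pvZig_nil hs _ _ _ (by omega : (l:Int) < l + 1), pvTailSum]
    · have hlt : l < r := lt_of_le_of_ne hlr heq
      simp only [if_neg heq]
      rcases hd with rfl | rfl
      · -- d = 0 : step to (d=1, l, r-1)
        norm_num
        rw [ih l (r - 1) _ 1 (by omega) (by omega) (Or.inr rfl)]
        rw [pvZig_low hs l (r - 1) (by omega)]
        simp [pvTailSum]
        ring
      · -- d = 1 : step to (d=0, l+1, r)
        norm_num
        rw [ih (l + 1) r _ 0 (by omega) (by omega) (Or.inl rfl)]
        rw [pvZig_high hs (l + 1) r (by omega)]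
        simp [pvTailSum]
        ring

-- ===== VERDICT (by name: the statement is the Claim_ definition above) =====
theorem maxCaloriesBurnt_spec : Claim_equal_maxCaloriesBurnt := by
  intro heights _ hpre
  unfold Spec_maxCaloriesBurnt maxCaloriesBurnt maxCaloriesBurnt_alt
  set hs := PySem.List.sorted heights (fun x => x) false with hhs
  have hne : hs ≠ [] := by
    simpa [hhs, PySem.List.sorted_eq_nil_iff] using hpre
  have hlen : 0 < hs.length := List.length_pos_of_ne_nil hne
  rw [pvLoop_eq_tailSum hs hs.length 0 ((hs.length : Int) - 1) _ 0
        (by omega) (by omega) (Or.inl rfl)]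
  simp only [List.tail_cons]
  rw [pvFoldl_zip_tailSum]
  rw [pvZig_high hs 0 ((hs.length : Int) - 1) (by omega)]
  simp [pvTailSum]
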